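-- pv_equiv track=rewrite | github.com/Eragon5779/CodeForReference | CodeWars/7kyu/divisibleBySeven.py | helper
-- ===== SOURCE A (Python) =====
-- def helper(m):
--     if m < 10:
--         return (m, 0)
--     count = 1
--     k = m//10
--     k -= 2 * (m % 10)
--     if k > 100:
--         a = helper(k)
--         count += a[1]
--         k = a[0]
--     return (k, count)
-- ===== SOURCE B (Python) =====
-- def helper(m):
--     if m < 10:
--         return (m, 0)
--     count = 0
--     k = m
--     while True:
--         count += 1
--         k = k // 10 - 2 * (k % 10)
--         if not (k > 100):
--             break
--     return (k, count)
-- ===== Notes on version B (the rewrite author's own statement) =====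
-- stated objective: idiomatic
-- what changed: Replaces A's non-tail recursion (which accumulates the step count while unwinding) with a single iterative loop threading k and count directly.
import Mathlib
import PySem

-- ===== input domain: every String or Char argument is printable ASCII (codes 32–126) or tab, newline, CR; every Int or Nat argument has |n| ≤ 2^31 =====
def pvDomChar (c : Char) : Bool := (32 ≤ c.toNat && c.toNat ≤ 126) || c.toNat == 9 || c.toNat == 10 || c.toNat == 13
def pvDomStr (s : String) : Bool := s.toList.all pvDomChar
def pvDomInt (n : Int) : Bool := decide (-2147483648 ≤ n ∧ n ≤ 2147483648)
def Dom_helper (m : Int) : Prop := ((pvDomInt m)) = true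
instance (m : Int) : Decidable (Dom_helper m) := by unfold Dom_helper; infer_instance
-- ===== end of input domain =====

-- B replaces A's non-tail recursion by an iterative loop threading (k, count); return value only, no speed claim.

-- termination fact shared by both ports: one reduction step shrinks k when the result exceeds 100
theorem pvStep_lt (k : Int) (h : PySem.Int.floordiv k 10 - 2 * PySem.Int.mod k 10 > 100) :
    (PySem.Int.floordiv k 10 - 2 * PySem.Int.mod k 10).toNat < k.toNat := by
  have hq := PySem.Int.floordiv_mul_add_mod k 10
  have hm : PySem.Int.mod k 10 = k % 10 := PySem.Int.mod_eq_emod_of_pos (by omega)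
  have h1 : 0 ≤ k % 10 := Int.emod_nonneg k (by omega)
  have h2 : k % 10 < 10 := Int.emod_lt_of_pos k (by omega)
  omega

-- ===== PORT A =====
def helper (m : Int) : Int × Int :=
  if m < 10 then (m, 0)
  else
    -- count = 1; k = m//10; k -= 2*(m%10)
    let k := PySem.Int.floordiv m 10 - 2 * PySem.Int.mod m 10
    if h : k > 100 then
      let a := helper k
      (a.1, 1 + a.2)
    else (k, 1)
termination_by m.toNat
decreasing_by exact pvStep_lt m h

-- ===== PORT B =====
-- the while-True loop of Source B: one iteration does count += 1; k = k//10 - 2*(k%10); break unless k > 100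
def helperLoop (k : Int) (count : Int) : Int × Int :=
  let k' := PySem.Int.floordiv k 10 - 2 * PySem.Int.mod k 10
  if h : k' > 100 then helperLoop k' (count + 1) else (k', count + 1)
termination_by k.toNat
decreasing_by exact pvStep_lt k h

def helper_alt (m : Int) : Int × Int :=
  if m < 10 then (m, 0) else helperLoop m 0

-- ===== PRECONDITION & SPEC =====
def Spec_helper (m : Int) (out : Int × Int) : Prop := out = helper_alt m
instance (m : Int) (out : Int × Int) : Decidable (Spec_helper m out) := by unfold Spec_helper; infer_instance

-- ===== CLAIM (what is proved, stated in full; the proofs are below) =====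
def Claim_equal_helper : Prop := ∀ (m : Int), Dom_helper m → Spec_helper m (helper m)

-- ===== LEMMAS AND PROOFS =====

theorem helperLoop_eq (k : Int) (count : Int) (hk : ¬ k < 10) :
    helperLoop k count = ((helper k).1, count + (helper k).2) := by
  induction k, count using helperLoop.induct with
  | case1 k count k' h ih =>
      rw [helperLoop, helper]
      simp only [hk, if_false, dif_pos h, k']
      have ih' := ih (by omega)
      simp only [k'] at ih'
      rw [ih']
      refine Prod.ext rfl ?_
      ring
  | case2 k count k' h =>
      rw [helperLoop, helper]
      simp only [hk, if_false, dif_neg h, k']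

theorem helper_eq_alt (m : Int) : helper m = helper_alt m := by
  unfold helper_alt
  by_cases hm : m < 10
  · rw [helper]; simp [hm]
  · rw [helperLoop_eq m 0 hm]; rw [helper]; simp [hm]

-- ===== VERDICT (by name: the statement is the Claim_ definition above) =====
theorem helper_spec : Claim_equal_helper := by
  intro m _
  unfold Spec_helper
  exact helper_eq_alt m
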